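-- pv_equiv track=rewrite | github.com/minho-sa/automation-sa | service_advisor_code_examples.py | analyze_security_group_rules
-- ===== SOURCE A (Python) =====
-- def create_resource_result(resource_id, resource_name, status, status_text, advice):
--     """
--     통일된 리소스 결과 객체를 생성합니다.
--
--     Args:
--         resource_id: 리소스 ID
--         resource_name: 리소스 이름
--         status: 리소스 상태 ('pass', 'fail', 'warning', 'unknown' 중 하나)
--         status_text: 상태 설명 텍스트
--         advice: 리소스 상태에 대한 설명
--
--     Returns:
--         통일된 리소스 결과 객체
--     """
--     return {
--         'id': resource_id,
--         'name': resource_name,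
--         'status': status,
--         'status_text': status_text,
--         'advice': advice
--     }
--
-- def analyze_security_group_rules(sg_id, sg_name, risky_rules):
--     """
--     보안 그룹 규칙을 분석하여 결과를 생성합니다.
--
--     Args:
--         sg_id: 보안 그룹 ID
--         sg_name: 보안 그룹 이름
--         risky_rules: 위험한 규칙 목록
--
--     Returns:
--         리소스 결과 객체
--     """
--     if not risky_rules:
--         status = "pass"
--         status_text = "안전"
--         advice = "이 보안 그룹은 모든 인바운드 규칙이 적절하게 구성되어 있습니다."
--         return create_resource_result(
--             resource_id=sg_id,
--             resource_name=sg_name,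
--             status=status,
--             status_text=status_text,
--             advice=advice
--         )
--
--     status = "fail"
--     status_text = "위험"
--
--     # 위험 유형 분석
--     advice_items = []
--
--     # SSH 위험 확인
--     if any(rule.get('port') == 22 for rule in risky_rules):
--         advice_items.append("이 보안 그룹은 SSH 포트(22)가 모든 IP에 개방되어 있어 무차별 대입 공격에 취약합니다.")
--
--     # RDP 위험 확인
--     if any(rule.get('port') == 3389 for rule in risky_rules):
--         advice_items.append("이 보안 그룹은 RDP 포트(3389)가 모든 IP에 개방되어 있어 보안 위험이 높습니다.")
--
--     # DB 위험 확인
--     if any(rule.get('port') in [3306, 5432] for rule in risky_rules):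
--         advice_items.append("이 보안 그룹은 데이터베이스 포트가 인터넷에 직접 노출되어 있어 데이터 유출 위험이 있습니다.")
--
--     # 모든 포트 위험 확인
--     if any(rule.get('all_ports', False) for rule in risky_rules):
--         advice_items.append("이 보안 그룹은 모든 포트(0-65535)가 개방되어 있어 심각한 보안 위험이 있습니다.")
--
--     advice = " ".join(advice_items)
--
--     return create_resource_result(
--         resource_id=sg_id,
--         resource_name=sg_name,
--         status=status,
--         status_text=status_text,
--         advice=advice
--     )
-- ===== SOURCE B (Python) =====
-- def create_resource_result(resource_id, resource_name, status, status_text, advice):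
--     return {
--         'id': resource_id,
--         'name': resource_name,
--         'status': status,
--         'status_text': status_text,
--         'advice': advice
--     }
--
-- def analyze_security_group_rules(sg_id, sg_name, risky_rules):
--     if not risky_rules:
--         return create_resource_result(
--             resource_id=sg_id,
--             resource_name=sg_name,
--             status="pass",
--             status_text="안전",
--             advice="이 보안 그룹은 모든 인바운드 규칙이 적절하게 구성되어 있습니다."
--         )
--
--     ssh = rdp = db = all_ports = False
--     for rule in risky_rules:
--         p = rule.get('port')
--         if p == 22:
--             ssh = True
--         if p == 3389:
--             rdp = True
--         if p in [3306, 5432]: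
--             db = True
--         if rule.get('all_ports', False):
--             all_ports = True
--
--     advice_items = []
--     if ssh:
--         advice_items.append("이 보안 그룹은 SSH 포트(22)가 모든 IP에 개방되어 있어 무차별 대입 공격에 취약합니다.")
--     if rdp:
--         advice_items.append("이 보안 그룹은 RDP 포트(3389)가 모든 IP에 개방되어 있어 보안 위험이 높습니다.")
--     if db:
--         advice_items.append("이 보안 그룹은 데이터베이스 포트가 인터넷에 직접 노출되어 있어 데이터 유출 위험이 있습니다.")
--     if all_ports:
--         advice_items.append("이 보안 그룹은 모든 포트(0-65535)가 개방되어 있어 심각한 보안 위험이 있습니다.")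
--
--     return create_resource_result(
--         resource_id=sg_id,
--         resource_name=sg_name,
--         status="fail",
--         status_text="위험",
--         advice=" ".join(advice_items)
--     )
-- ===== Notes on version B (the rewrite author's own statement) =====
-- stated objective: alternative
-- what changed: Replaces four separate any(...) scans over risky_rules with a single pass that sets four boolean flags, then emits the advice strings in the same fixed order.
import Mathlib
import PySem

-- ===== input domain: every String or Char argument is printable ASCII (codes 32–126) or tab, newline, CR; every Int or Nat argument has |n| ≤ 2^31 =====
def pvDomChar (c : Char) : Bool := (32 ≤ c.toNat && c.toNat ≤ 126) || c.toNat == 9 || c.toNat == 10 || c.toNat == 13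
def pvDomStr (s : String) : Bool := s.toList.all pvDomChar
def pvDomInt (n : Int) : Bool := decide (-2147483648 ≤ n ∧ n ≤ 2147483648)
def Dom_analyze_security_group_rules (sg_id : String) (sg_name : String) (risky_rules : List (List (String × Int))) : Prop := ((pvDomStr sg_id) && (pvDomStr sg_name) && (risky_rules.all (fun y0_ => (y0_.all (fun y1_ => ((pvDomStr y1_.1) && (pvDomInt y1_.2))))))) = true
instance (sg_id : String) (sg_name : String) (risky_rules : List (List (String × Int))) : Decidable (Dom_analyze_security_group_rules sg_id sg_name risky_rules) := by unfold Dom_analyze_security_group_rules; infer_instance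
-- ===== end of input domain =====

-- B replaces A's four separate any(...) scans with one single-pass loop setting four flags (alternative decomposition: one loop instead of four scans).

-- ===== PORT A =====
-- create_resource_result: builds the result dict in fixed insertion order
def create_resource_result (resource_id resource_name status status_text advice : String) : List (String × String) :=
  [("id", resource_id), ("name", resource_name), ("status", status), ("status_text", status_text), ("advice", advice)]

def analyze_security_group_rules (sg_id : String) (sg_name : String) (risky_rules : List (List (String × Int))) : List (String × String) :=
  if risky_rules.isEmpty then
    create_resource_result sg_id sg_name "pass" "안전" "이 보안 그룹은 모든 인바운드 규칙이 적절하게 구성되어 있습니다."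
  else
    let advice_items : List String := []
    let advice_items := if risky_rules.any (fun rule => PySem.Dict.get? ⟨rule⟩ "port" == some (22:Int)) then
        advice_items ++ ["이 보안 그룹은 SSH 포트(22)가 모든 IP에 개방되어 있어 무차별 대입 공격에 취약합니다."] else advice_items
    let advice_items := if risky_rules.any (fun rule => PySem.Dict.get? ⟨rule⟩ "port" == some (3389:Int)) then
        advice_items ++ ["이 보안 그룹은 RDP 포트(3389)가 모든 IP에 개방되어 있어 보안 위험이 높습니다."] else advice_items
    let advice_items := if risky_rules.any (fun rule => PySem.Dict.get? ⟨rule⟩ "port" == some (3306:Int) || PySem.Dict.get? ⟨rule⟩ "port" == some (5432:Int)) then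
        advice_items ++ ["이 보안 그룹은 데이터베이스 포트가 인터넷에 직접 노출되어 있어 데이터 유출 위험이 있습니다."] else advice_items
    let advice_items := if risky_rules.any (fun rule => PySem.Dict.getD ⟨rule⟩ "all_ports" (0:Int) != 0) then
        advice_items ++ ["이 보안 그룹은 모든 포트(0-65535)가 개방되어 있어 심각한 보안 위험이 있습니다."] else advice_items
    create_resource_result sg_id sg_name "fail" "위험" (PySem.Str.join " " advice_items)

-- ===== PORT B =====
-- single pass over risky_rules accumulating four boolean flags
def sgFlags (risky_rules : List (List (String × Int))) : Bool × Bool × Bool × Bool :=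
  risky_rules.foldl (fun f rule =>
    let p := PySem.Dict.get? ⟨rule⟩ "port"
    (f.1 || p == some (22:Int),
     f.2.1 || p == some (3389:Int),
     f.2.2.1 || (p == some (3306:Int) || p == some (5432:Int)),
     f.2.2.2 || PySem.Dict.getD ⟨rule⟩ "all_ports" (0:Int) != 0)) (false, false, false, false)

def analyze_security_group_rules_alt (sg_id : String) (sg_name : String) (risky_rules : List (List (String × Int))) : List (String × String) :=
  if risky_rules.isEmpty then
    create_resource_result sg_id sg_name "pass" "안전" "이 보안 그룹은 모든 인바운드 규칙이 적절하게 구성되어 있습니다."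
  else
    let (ssh, rdp, db, ap) := sgFlags risky_rules
    let advice_items : List String :=
      (if ssh then ["이 보안 그룹은 SSH 포트(22)가 모든 IP에 개방되어 있어 무차별 대입 공격에 취약합니다."] else []) ++
      (if rdp then ["이 보안 그룹은 RDP 포트(3389)가 모든 IP에 개방되어 있어 보안 위험이 높습니다."] else []) ++
      (if db then ["이 보안 그룹은 데이터베이스 포트가 인터넷에 직접 노출되어 있어 데이터 유출 위험이 있습니다."] else []) ++
      (if ap then ["이 보안 그룹은 모든 포트(0-65535)가 개방되어 있어 심각한 보안 위험이 있습니다."] else [])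
    create_resource_result sg_id sg_name "fail" "위험" (PySem.Str.join " " advice_items)

-- ===== PRECONDITION & SPEC =====
def Spec_analyze_security_group_rules (sg_id : String) (sg_name : String) (risky_rules : List (List (String × Int))) (out : List (String × String)) : Prop := out = analyze_security_group_rules_alt sg_id sg_name risky_rules
instance (sg_id : String) (sg_name : String) (risky_rules : List (List (String × Int))) (out : List (String × String)) : Decidable (Spec_analyze_security_group_rules sg_id sg_name risky_rules out) := by unfold Spec_analyze_security_group_rules; infer_instance

-- ===== CLAIM (what is proved, stated in full; the proofs are below) =====
def Claim_equal_analyze_security_group_rules : Prop := ∀ (sg_id : String) (sg_name : String) (risky_rules : List (List (String × Int))), Dom_analyze_security_group_rules sg_id sg_name risky_rules → Spec_analyze_security_group_rules sg_id sg_name risky_rules (analyze_security_group_rules sg_id sg_name risky_rules)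

-- ===== LEMMAS AND PROOFS =====

-- The one-pass fold computes exactly the four any-scans.
theorem sgFlags_eq (risky_rules : List (List (String × Int))) :
    sgFlags risky_rules =
      (risky_rules.any (fun rule => PySem.Dict.get? ⟨rule⟩ "port" == some (22:Int)),
       risky_rules.any (fun rule => PySem.Dict.get? ⟨rule⟩ "port" == some (3389:Int)),
       risky_rules.any (fun rule => PySem.Dict.get? ⟨rule⟩ "port" == some (3306:Int) || PySem.Dict.get? ⟨rule⟩ "port" == some (5432:Int)),
       risky_rules.any (fun rule => PySem.Dict.getD ⟨rule⟩ "all_ports" (0:Int) != 0)) := by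
  unfold sgFlags
  suffices h : ∀ (a b c d : Bool),
      risky_rules.foldl (fun f rule =>
        let p := PySem.Dict.get? ⟨rule⟩ "port"
        (f.1 || p == some (22:Int),
         f.2.1 || p == some (3389:Int),
         f.2.2.1 || (p == some (3306:Int) || p == some (5432:Int)),
         f.2.2.2 || PySem.Dict.getD ⟨rule⟩ "all_ports" (0:Int) != 0)) (a, b, c, d) =
      (a || risky_rules.any (fun rule => PySem.Dict.get? ⟨rule⟩ "port" == some (22:Int)),
       b || risky_rules.any (fun rule => PySem.Dict.get? ⟨rule⟩ "port" == some (3389:Int)),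
       c || risky_rules.any (fun rule => PySem.Dict.get? ⟨rule⟩ "port" == some (3306:Int) || PySem.Dict.get? ⟨rule⟩ "port" == some (5432:Int)),
       d || risky_rules.any (fun rule => PySem.Dict.getD ⟨rule⟩ "all_ports" (0:Int) != 0)) by
    simpa using h false false false false
  induction risky_rules with
  | nil => simp
  | cons r rs ih =>
    intro a b c d
    simp [List.foldl_cons, List.any_cons, ih, Bool.or_assoc]

-- ===== VERDICT (by name: the statement is the Claim_ definition above) =====
theorem analyze_security_group_rules_spec : Claim_equal_analyze_security_group_rules := by
  intro sg_id sg_name risky_rules _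
  unfold Spec_analyze_security_group_rules analyze_security_group_rules analyze_security_group_rules_alt
  by_cases h : risky_rules.isEmpty
  · simp [h]
  · simp only [h, sgFlags_eq]
    split_ifs <;> rfl
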